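-- pv_equiv track=rewrite | github.com/Leapense/problems | 16206번: Roll cake/solution.py | max_ten_pieces
-- ===== SOURCE A (Python) =====
-- from typing import List
--
-- def max_ten_pieces(cakes: List[int], max_cuts: int) -> int:
--     ready = sum(1 for length in cakes if length == 10)
--     divisible = [c for c in cakes if c > 10 and c % 10 == 0]
--     others = [c for c in cakes if c > 10 and c % 10 != 0]
--
--     divisible.sort()
--     pieces = ready
--     cuts = max_cuts
--
--     for length in divisible:
--         if cuts == 0:
--             break
--         ten_count = length // 10
--         need = ten_count - 1
--         if cuts >= need:
--             pieces += ten_count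
--             cuts -= need
--         else:
--             pieces += cuts
--             cuts = 0
--             break
--     if cuts > 0:
--         others.sort()
--         for length in others:
--             if cuts == 0:
--                 break
--             ten_count = length // 10
--             if ten_count == 0:
--                 continue
--             need = ten_count
--             if cuts >= need:
--                 pieces += ten_count
--                 cuts -= need
--             else:
--                 pieces += cuts
--                 cuts = 0
--                 break
--     return pieces
-- ===== SOURCE B (Python) =====
-- from typing import List
--
-- def max_ten_pieces(cakes: List[int], max_cuts: int) -> int:
--     # Arithmetic characterization instead of a budget-spending greedy loop:
--     # every cut spent yields exactly one 10cm piece, and each divisible cake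
--     # that is fully sliced contributes one extra free piece (its last piece
--     # needs no cut).  So the answer is
--     #   ready + min(budget, total_need) + (# divisible cakes fully sliced),
--     # where a divisible cake c costs c//10 - 1 cuts and any other cake longer
--     # than 10 costs c//10 cuts, and the fully sliced divisible cakes are
--     # exactly those whose ascending prefix sums of costs fit in the budget.
--     ready = cakes.count(10)
--     div_needs = sorted(c // 10 - 1 for c in cakes if c > 10 and c % 10 == 0)
--     total_need = sum(div_needs) + sum(c // 10 for c in cakes if c > 10 and c % 10 != 0)
--     budget = max(max_cuts, 0)
--     prefix = []
--     acc = 0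
--     for n in div_needs:
--         acc += n
--         prefix.append(acc)
--     bonus = sum(1 for s in prefix if s <= budget)
--     return ready + min(budget, total_need) + bonus
-- ===== Notes on version B (the rewrite author's own statement) =====
-- stated objective: alternative
-- what changed: A's stateful two-phase greedy spend loop is replaced by an arithmetic identity: answer = ready + min(budget, total cut cost) + number of divisible cakes whose ascending prefix-sum of costs fits the budget, computed from sums and a prefix-sum count with no budget-spending loop.
-- outside the precondition, e.g. on max_ten_pieces([20], -1): A returns -1, B returns 0
import Mathlib
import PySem

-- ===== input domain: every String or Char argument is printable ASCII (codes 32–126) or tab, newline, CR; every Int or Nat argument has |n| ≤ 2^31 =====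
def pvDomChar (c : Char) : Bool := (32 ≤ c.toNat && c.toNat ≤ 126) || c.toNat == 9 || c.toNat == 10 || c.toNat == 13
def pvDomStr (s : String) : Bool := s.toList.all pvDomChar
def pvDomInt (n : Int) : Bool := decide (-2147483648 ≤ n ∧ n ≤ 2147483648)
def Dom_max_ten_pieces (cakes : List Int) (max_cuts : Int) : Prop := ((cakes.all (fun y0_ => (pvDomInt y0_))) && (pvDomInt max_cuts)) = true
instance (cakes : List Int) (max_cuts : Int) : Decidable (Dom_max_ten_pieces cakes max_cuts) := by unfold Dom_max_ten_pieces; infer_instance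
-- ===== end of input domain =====

-- B replaces A's stateful two-phase greedy spend loop by an arithmetic identity
-- (one piece per cut plus a bonus per fully sliced divisible cake, via prefix sums);
-- objective: alternative (no speed claim).

-- ===== PORT A =====
-- the divisible phase: returns (pieces, cuts) after the loop
def aLoopDiv : List Int → Int → Int → Int × Int
  | [], pieces, cuts => (pieces, cuts)
  | l :: ls, pieces, cuts =>
    if cuts == 0 then (pieces, cuts)
    else
      let ten_count := PySem.Int.floordiv l 10
      let need := ten_count - 1
      if cuts ≥ need then aLoopDiv ls (pieces + ten_count) (cuts - need)
      else (pieces + cuts, 0)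

-- the others phase: only pieces is needed afterwards
def aLoopOth : List Int → Int → Int → Int
  | [], pieces, _ => pieces
  | l :: ls, pieces, cuts =>
    if cuts == 0 then pieces
    else
      let ten_count := PySem.Int.floordiv l 10
      if ten_count == 0 then aLoopOth ls pieces cuts
      else if cuts ≥ ten_count then aLoopOth ls (pieces + ten_count) (cuts - ten_count)
      else pieces + cuts

def max_ten_pieces (cakes : List Int) (max_cuts : Int) : Int :=
  let ready : Int := cakes.foldl (fun a c => if c == 10 then a + 1 else a) 0
  let divisible := cakes.filter (fun c => c > 10 && PySem.Int.mod c 10 == 0)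
  let others := cakes.filter (fun c => c > 10 && !(PySem.Int.mod c 10 == 0))
  let divS := PySem.List.sorted divisible (fun x => x) false
  let r := aLoopDiv divS ready max_cuts
  if r.2 > 0 then aLoopOth (PySem.List.sorted others (fun x => x) false) r.1 r.2
  else r.1

-- ===== PORT B =====
def max_ten_pieces_alt (cakes : List Int) (max_cuts : Int) : Int :=
  let ready : Int := (PySem.List.count cakes 10 : Nat)
  let div_needs := PySem.List.sorted
      ((cakes.filter (fun c => c > 10 && PySem.Int.mod c 10 == 0)).map
        (fun c => PySem.Int.floordiv c 10 - 1)) (fun x => x) false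
  let total_need := div_needs.sum
      + ((cakes.filter (fun c => c > 10 && !(PySem.Int.mod c 10 == 0))).map
          (fun c => PySem.Int.floordiv c 10)).sum
  let budget := max max_cuts 0
  -- the Python for-loop appending running sums, as a fold over (prefix, acc)
  let prefs := (div_needs.foldl
      (fun (st : List Int × Int) n => (st.1 ++ [st.2 + n], st.2 + n)) ([], 0)).1
  let bonus : Int := ((prefs.filter (fun s => s ≤ budget)).length : Nat)
  ready + min budget total_need + bonus

-- ===== PRECONDITION & SPEC =====
-- Pre_ excludes only a negative cut budget combined with a divisible cake: there A adds
-- the negative budget to the piece count (via its break branch) while B spends no cuts.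
def Pre_max_ten_pieces (cakes : List Int) (max_cuts : Int) : Prop :=
  0 ≤ max_cuts ∨ ∀ c ∈ cakes, ¬(10 < c ∧ PySem.Int.mod c 10 = 0)
instance (cakes : List Int) (max_cuts : Int) : Decidable (Pre_max_ten_pieces cakes max_cuts) := by
  unfold Pre_max_ten_pieces; infer_instance

def pvWitness_max_ten_pieces : List Int × Int := ([10, 20, 25, 7], 3)

def Spec_max_ten_pieces (cakes : List Int) (max_cuts : Int) (out : Int) : Prop := out = max_ten_pieces_alt cakes max_cuts
instance (cakes : List Int) (max_cuts : Int) (out : Int) : Decidable (Spec_max_ten_pieces cakes max_cuts out) := by unfold Spec_max_ten_pieces; infer_instance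

-- ===== CLAIM (what is proved, stated in full; the proofs are below) =====
def Claim_equal_max_ten_pieces : Prop := ∀ (cakes : List Int) (max_cuts : Int), Dom_max_ten_pieces cakes max_cuts → Pre_max_ten_pieces cakes max_cuts → Spec_max_ten_pieces cakes max_cuts (max_ten_pieces cakes max_cuts)

-- ===== LEMMAS AND PROOFS =====

-- running prefix sums of ns starting from accumulator a
def preSums : List Int → Int → List Int
  | [], _ => []
  | n :: ns, a => (a + n) :: preSums ns (a + n)

-- B's fold builds exactly the prefix sums
theorem fold_preSums (ns : List Int) (l : List Int) (a : Int) :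
    (ns.foldl (fun (st : List Int × Int) n => (st.1 ++ [st.2 + n], st.2 + n)) (l, a)).1
      = l ++ preSums ns a := by
  induction ns generalizing l a with
  | nil => simp [preSums]
  | cons n ns ih => simp [List.foldl_cons, preSums, ih]

-- the greedy completion count: how many leading needs fit in the budget
def cnt : List Int → Int → Int
  | [], _ => 0
  | n :: ns, b => if n ≤ b then 1 + cnt ns (b - n) else 0

theorem preSums_ge (ns : List Int) (a : Int) (h : ∀ x ∈ ns, 0 ≤ x) :
    ∀ s ∈ preSums ns a, a ≤ s := by
  induction ns generalizing a with
  | nil => simp [preSums]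
  | cons n ns ih =>
    intro s hs
    have hn : 0 ≤ n := h n (List.mem_cons_self ..)
    rcases (List.mem_cons.mp hs) with rfl | hs'
    · omega
    · have := ih (a + n) (fun x hx => h x (List.mem_cons_of_mem _ hx)) s hs'
      omega

-- counting prefix sums below the budget is the greedy completion count
theorem filter_preSums_cnt (ns : List Int) (a b : Int) (h : ∀ x ∈ ns, 0 ≤ x) :
    (((preSums ns a).filter (fun s => s ≤ b)).length : Int) = cnt ns (b - a) := by
  induction ns generalizing a b with
  | nil => simp [preSums, cnt]
  | cons n ns ih =>
    have htail : ∀ x ∈ ns, 0 ≤ x := fun x hx => h x (List.mem_cons_of_mem _ hx)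
    simp only [preSums, cnt, List.filter_cons]
    by_cases hle : a + n ≤ b
    · rw [if_pos (by simpa using hle), if_pos (by omega : n ≤ b - a)]
      have := ih (a + n) b htail
      have harg : b - (a + n) = b - a - n := by ring
      rw [harg] at this
      simp only [List.length_cons]
      push_cast
      rw [this]
      omega
    · rw [if_neg (by simpa using hle), if_neg (by omega : ¬ n ≤ b - a)]
      have hall : (preSums ns (a + n)).filter (fun s => s ≤ b) = [] := by
        rw [List.filter_eq_nil_iff]
        intro s hs
        have := preSums_ge ns (a + n) htail s hs
        simp only [decide_eq_true_eq]
        omega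
      simp [hall]

-- the others phase: one piece per spent cut, capped by the total cost
theorem othPhase (os : List Int) (p cuts : Int)
    (h : ∀ o ∈ os, 1 ≤ PySem.Int.floordiv o 10) (hc : 0 ≤ cuts) :
    aLoopOth os p cuts = p + min cuts ((os.map (fun o => PySem.Int.floordiv o 10)).sum) := by
  induction os generalizing p cuts with
  | nil =>
    simp only [aLoopOth, List.map_nil, List.sum_nil]
    omega
  | cons o os ih =>
    have ho : 1 ≤ PySem.Int.floordiv o 10 := h o (List.mem_cons_self ..)
    have htail : ∀ x ∈ os, 1 ≤ PySem.Int.floordiv x 10 :=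
      fun x hx => h x (List.mem_cons_of_mem _ hx)
    have hsum : 0 ≤ (os.map (fun o => PySem.Int.floordiv o 10)).sum :=
      List.sum_nonneg (by
        intro x hx
        obtain ⟨y, hy, rfl⟩ := List.mem_map.mp hx
        exact le_of_lt (by exact_mod_cast htail y hy))
    simp only [aLoopOth, List.map_cons, List.sum_cons, beq_iff_eq, ge_iff_le]
    by_cases h0 : cuts = 0
    · subst h0; rw [if_pos rfl]; omega
    · rw [if_neg h0, if_neg (by omega : ¬ PySem.Int.floordiv o 10 = 0)]
      by_cases hge : PySem.Int.floordiv o 10 ≤ cuts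
      · rw [if_pos hge, ih _ _ htail (by omega)]
        omega
      · rw [if_neg hge]
        omega

-- the divisible phase: one piece per spent cut plus one bonus per completed cake,
-- and the leftover budget, both in closed form
theorem divPhase (ds : List Int) (p cuts : Int)
    (h : ∀ c ∈ ds, 2 ≤ PySem.Int.floordiv c 10) (hc : 0 ≤ cuts) :
    aLoopDiv ds p cuts =
      (p + min cuts ((ds.map (fun c => PySem.Int.floordiv c 10 - 1)).sum)
         + cnt (ds.map (fun c => PySem.Int.floordiv c 10 - 1)) cuts,
       cuts - min cuts ((ds.map (fun c => PySem.Int.floordiv c 10 - 1)).sum)) := by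
  induction ds generalizing p cuts with
  | nil =>
    simp only [aLoopDiv, List.map_nil, List.sum_nil, cnt, Prod.mk.injEq]
    exact ⟨by omega, by omega⟩
  | cons c ds ih =>
    have hcd : 2 ≤ PySem.Int.floordiv c 10 := h c (List.mem_cons_self ..)
    have htail : ∀ x ∈ ds, 2 ≤ PySem.Int.floordiv x 10 :=
      fun x hx => h x (List.mem_cons_of_mem _ hx)
    have hsum : 0 ≤ (ds.map (fun c => PySem.Int.floordiv c 10 - 1)).sum :=
      List.sum_nonneg (by
        intro x hx
        obtain ⟨y, hy, rfl⟩ := List.mem_map.mp hx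
        have := htail y hy
        omega)
    simp only [aLoopDiv, List.map_cons, List.sum_cons, cnt, beq_iff_eq, ge_iff_le]
    by_cases h0 : cuts = 0
    · subst h0
      rw [if_pos rfl, if_neg (by omega : ¬ PySem.Int.floordiv c 10 - 1 ≤ (0:Int)), Prod.mk.injEq]
      exact ⟨by omega, by omega⟩
    · rw [if_neg h0]
      by_cases hge : PySem.Int.floordiv c 10 - 1 ≤ cuts
      · rw [if_pos hge, if_pos hge, ih _ _ htail (by omega), Prod.mk.injEq]
        exact ⟨by omega, by omega⟩
      · rw [if_neg hge, if_neg hge, Prod.mk.injEq]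
        exact ⟨by omega, by omega⟩

theorem floordiv_ten_mono (a b : Int) (h : a ≤ b) :
    PySem.Int.floordiv a 10 ≤ PySem.Int.floordiv b 10 := by
  rw [PySem.Int.floordiv_eq_ediv_of_pos (by norm_num), PySem.Int.floordiv_eq_ediv_of_pos (by norm_num)]
  exact Int.ediv_le_ediv (by norm_num) h

-- sorting the images of a monotone map = mapping over the sorted sources
theorem sorted_map_comm (xs : List Int) (f : Int → Int)
    (hmono : ∀ a b : Int, a ≤ b → f a ≤ f b) :
    PySem.List.sorted (xs.map f) (fun x => x) false
      = (PySem.List.sorted xs (fun x => x) false).map f := by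
  apply PySem.List.sorted_id_eq_of_perm_of_pairwise
  · exact (PySem.List.sorted_perm xs (fun x => x) false).map f
  · exact (PySem.List.sorted_pairwise xs (fun x => x)).map f (fun a b h => hmono a b h)

-- ===== VERDICT (by name: the statement is the Claim_ definition above) =====
theorem max_ten_pieces_spec : Claim_equal_max_ten_pieces := by
  intro cakes max_cuts _ hpre
  unfold Spec_max_ten_pieces max_ten_pieces max_ten_pieces_alt
  dsimp only
  rw [PySem.List.foldl_beq_add_one, PySem.List.count_eq]
  by_cases hnn : 0 ≤ max_cuts
  case neg =>
    -- negative budget: Pre_ guarantees no divisible cake; both return the ready count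
    have hnone : ∀ c ∈ cakes, ¬(10 < c ∧ PySem.Int.mod c 10 = 0) := by
      rcases hpre with h | h
      · exact absurd h hnn
      · exact h
    have hfil : cakes.filter (fun c => c > 10 && PySem.Int.mod c 10 == 0) = [] := by
      rw [List.filter_eq_nil_iff]
      intro c hc
      have := hnone c hc
      simp only [gt_iff_lt, Bool.and_eq_true, decide_eq_true_eq, beq_iff_eq]
      tauto
    have hT : 0 ≤ ((cakes.filter (fun c => c > 10 && !(PySem.Int.mod c 10 == 0))).map
        (fun c => PySem.Int.floordiv c 10)).sum := by
      apply List.sum_nonneg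
      intro x hx
      obtain ⟨y, hy, rfl⟩ := List.mem_map.mp hx
      have hy' := List.of_mem_filter hy
      simp only [gt_iff_lt, Bool.and_eq_true, decide_eq_true_eq] at hy'
      rw [PySem.Int.floordiv_eq_ediv_of_pos (by norm_num)]
      omega
    rw [hfil]
    rw [show PySem.List.sorted (List.map (fun c => PySem.Int.floordiv c 10 - 1) []) (fun x => x) false = [] from rfl,
        show PySem.List.sorted ([] : List Int) (fun x => x) false = [] from rfl]
    simp only [aLoopDiv, List.foldl_nil, List.sum_nil, List.filter_nil, List.length_nil,
      zero_add, gt_iff_lt]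
    rw [if_neg (by omega : ¬ max_cuts > 0)]
    have : max max_cuts 0 = 0 := by omega
    rw [this]
    simp only [Nat.cast_zero]
    simp only [gt_iff_lt] at hT ⊢
    omega
  case pos =>
    have hbud : max max_cuts 0 = max_cuts := by omega
    rw [hbud]
    -- facts about the two filtered lists
    have hdiv : ∀ c ∈ PySem.List.sorted
        (cakes.filter (fun c => c > 10 && PySem.Int.mod c 10 == 0)) (fun x => x) false,
        2 ≤ PySem.Int.floordiv c 10 := by
      intro c hc
      have hc' := (PySem.List.sorted_perm _ _ _).mem_iff.mp hc
      have := List.of_mem_filter hc'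
      simp only [gt_iff_lt, Bool.and_eq_true, decide_eq_true_eq, beq_iff_eq] at this
      rw [PySem.Int.floordiv_eq_ediv_of_pos (by norm_num)]
      rw [PySem.Int.mod_eq_emod_of_pos (by norm_num : (0:Int) < 10)] at this
      omega
    have hoth : ∀ o ∈ PySem.List.sorted
        (cakes.filter (fun c => c > 10 && !(PySem.Int.mod c 10 == 0))) (fun x => x) false,
        1 ≤ PySem.Int.floordiv o 10 := by
      intro o ho
      have ho' := (PySem.List.sorted_perm _ _ _).mem_iff.mp ho
      have := List.of_mem_filter ho'
      simp only [gt_iff_lt, Bool.and_eq_true, decide_eq_true_eq] at this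
      rw [PySem.Int.floordiv_eq_ediv_of_pos (by norm_num)]
      omega
    rw [sorted_map_comm _ _ (fun a b h => by have := floordiv_ten_mono a b h; omega)]
    set ds := PySem.List.sorted
        (cakes.filter (fun c => c > 10 && PySem.Int.mod c 10 == 0)) (fun x => x) false with hds
    set os := PySem.List.sorted
        (cakes.filter (fun c => c > 10 && !(PySem.Int.mod c 10 == 0))) (fun x => x) false with hos
    set ns := ds.map (fun c => PySem.Int.floordiv c 10 - 1) with hns
    have hns0 : ∀ x ∈ ns, 0 ≤ x := by
      intro x hx
      obtain ⟨y, hy, rfl⟩ := List.mem_map.mp hx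
      have := hdiv y hy
      omega
    have hN : 0 ≤ ns.sum := List.sum_nonneg (fun x hx => hns0 x hx)
    have hT : 0 ≤ (os.map (fun o => PySem.Int.floordiv o 10)).sum := by
      apply List.sum_nonneg
      intro x hx
      obtain ⟨y, hy, rfl⟩ := List.mem_map.mp hx
      have := hoth y hy
      omega
    -- A's two phases in closed form
    rw [divPhase ds _ _ (fun c hc => hdiv c hc) hnn]
    rw [← hns]
    dsimp only
    have hpermo : (os.map (fun o => PySem.Int.floordiv o 10)).sum
        = ((cakes.filter (fun c => c > 10 && !(PySem.Int.mod c 10 == 0))).map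
            (fun c => PySem.Int.floordiv c 10)).sum :=
      List.Perm.sum_eq ((PySem.List.sorted_perm _ _ _).map _)
    rw [fold_preSums ns [] 0, List.nil_append]
    have hcnt : (((preSums ns 0).filter (fun s => s ≤ max_cuts)).length : Int)
        = cnt ns max_cuts := by
      rw [filter_preSums_cnt ns 0 max_cuts hns0]
      congr 1
      omega
    by_cases hcase : max_cuts - min max_cuts ns.sum > 0
    · rw [if_pos hcase]
      rw [othPhase os _ _ (fun o ho => hoth o ho) (by omega)]
      rw [hcnt]
      omega
    · rw [if_neg hcase]
      rw [hcnt]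
      omega
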